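-- pv_equiv track=rewrite | github.com/cseriildi/Cloudflight-Coding-Contest | Room_Planner/level3/level3.py | room_planner
-- ===== SOURCE A (Python) =====
-- def	room_planner(width, length):
-- 	room = []
-- 	room_index = 0
--
-- 	column = width % 3 * -1
-- 	max_row = length - length % 3
--
-- 	for _ in range(length):
-- 		line = []
-- 		for x in range(width):
-- 			if x < width + column:
-- 				if x % 3 == 0:
-- 					room_index += 1
-- 				line.append(str(room_index))
-- 			else:
-- 				line.append("0")
--
-- 		room.append(line[:])
--
-- 	if width % 3 != 0:
-- 		for row in range(0, max_row, 3):
-- 			room_index += 1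
-- 			room[row][column] = str(room_index)
-- 			room[row + 1][column] = str(room_index)
-- 			room[row + 2][column] = str(room_index)
--
-- 			if column == -2:
-- 				room_index += 1
-- 				room[row][column + 1] = str(room_index)
-- 				room[row + 1][column + 1] = str(room_index)
-- 				room[row + 2][column + 1] = str(room_index)
--
-- 	return '\n'.join([' '.join(line) for line in room]) + "\n"
-- ===== SOURCE B (Python) =====
-- def room_planner(width, length):
--     wm = width % 3
--     w3 = width - wm            # width of the full 1x3-room strip
--     n = w3 // 3                # rooms per row in the strip
--     base = length * n          # first leftover room number - 1
--     lmax = length - length % 3 # leftover rooms only cover full row-triples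
--
--     def cell(r, c):
--         if c < w3:
--             return str(r * n + c // 3 + 1)
--         if r >= lmax or wm == 0:
--             return "0"
--         if wm == 1:
--             return str(base + r // 3 + 1)
--         return str(base + 2 * (r // 3) + (1 if c == w3 else 2))
--
--     return '\n'.join(
--         ' '.join(cell(r, c) for c in range(width)) for r in range(length)
--     ) + "\n"
-- ===== Notes on version B (the rewrite author's own statement) =====
-- stated objective: alternative
-- what changed: Instead of building the grid row by row with a running room counter and then destructively overwriting the leftover column strip via negative indexing, B emits each cell directly from a closed-form arithmetic formula in a single pass.
import Mathlib
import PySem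

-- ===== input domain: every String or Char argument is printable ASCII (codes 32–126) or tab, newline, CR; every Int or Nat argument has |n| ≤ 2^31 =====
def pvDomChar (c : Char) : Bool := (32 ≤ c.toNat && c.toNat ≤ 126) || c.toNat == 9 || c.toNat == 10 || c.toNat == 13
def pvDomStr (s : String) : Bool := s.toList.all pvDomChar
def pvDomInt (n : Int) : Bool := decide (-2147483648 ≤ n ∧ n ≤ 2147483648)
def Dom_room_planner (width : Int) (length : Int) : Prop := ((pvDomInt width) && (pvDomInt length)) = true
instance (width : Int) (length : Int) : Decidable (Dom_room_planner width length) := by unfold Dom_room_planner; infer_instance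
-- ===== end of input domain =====

-- B rewrites A's build-then-overwrite grid construction as a single pass that computes each
-- cell's room number by closed-form arithmetic; A = B is proved on Pre_ (A raises IndexError
-- outside it).

-- ===== PORT A =====
-- inner loop: 'for x in range(width): …' over state (line, room_index)
def pvInnerStep (width column : Int) (st : List String × Int) (x : Int) : List String × Int :=
  if x < width + column then
    let ri := if PySem.Int.mod x 3 = 0 then st.2 + 1 else st.2
    (st.1 ++ [PySem.Int.toStr ri], ri)
  else
    (st.1 ++ ["0"], st.2)

-- outer loop body: 'for _ in range(length): … room.append(line[:])' over state (room, room_index)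
def pvRowStep (width column : Int) (st : List (List String) × Int) (_r : Int) :
    List (List String) × Int :=
  let p := (PySem.List.pyRange 0 width 1).foldl (pvInnerStep width column) ([], st.2)
  (st.1 ++ [p.1], p.2)

-- 'room[i][j] = v'; exact whenever i and j are in range (guaranteed under Pre_ where A runs it)
def pvSetCell (room : List (List String)) (i j : Int) (v : String) : List (List String) :=
  PySem.List.pySetD room i (PySem.List.pySetD (PySem.List.pyGetD room i []) j v)

-- body of 'for row in range(0, max_row, 3): …'
def pvFixStep (column : Int) (st : List (List String) × Int) (row : Int) :
    List (List String) × Int :=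
  let ri := st.2 + 1
  let room := pvSetCell st.1 row column (PySem.Int.toStr ri)
  let room := pvSetCell room (row + 1) column (PySem.Int.toStr ri)
  let room := pvSetCell room (row + 2) column (PySem.Int.toStr ri)
  if column = -2 then
    let ri2 := ri + 1
    let room := pvSetCell room row (column + 1) (PySem.Int.toStr ri2)
    let room := pvSetCell room (row + 1) (column + 1) (PySem.Int.toStr ri2)
    let room := pvSetCell room (row + 2) (column + 1) (PySem.Int.toStr ri2)
    (room, ri2)
  else
    (room, ri)

def room_planner (width : Int) (length : Int) : String :=
  let column := PySem.Int.mod width 3 * (-1)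
  let max_row := length - PySem.Int.mod length 3
  let p := (PySem.List.pyRange 0 length 1).foldl (pvRowStep width column) ([], 0)
  let room :=
    if PySem.Int.mod width 3 ≠ 0 then
      ((PySem.List.pyRange 0 max_row 3).foldl (pvFixStep column) p).1
    else p.1
  PySem.Str.join "\n" (room.map (fun line => PySem.Str.join " " line)) ++ "\n"

-- ===== PORT B =====
def pvCellB (width length r c : Int) : String :=
  let wm := PySem.Int.mod width 3
  let w3 := width - wm
  let n := PySem.Int.floordiv w3 3
  let base := length * n
  let lmax := length - PySem.Int.mod length 3
  if c < w3 then PySem.Int.toStr (r * n + PySem.Int.floordiv c 3 + 1)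
  else if lmax ≤ r ∨ wm = 0 then "0"
  else if wm = 1 then PySem.Int.toStr (base + PySem.Int.floordiv r 3 + 1)
  else PySem.Int.toStr (base + 2 * PySem.Int.floordiv r 3 + (if c = w3 then 1 else 2))

def room_planner_alt (width : Int) (length : Int) : String :=
  PySem.Str.join "\n"
    ((PySem.List.pyRange 0 length 1).map (fun r =>
      PySem.Str.join " " ((PySem.List.pyRange 0 width 1).map (pvCellB width length r)))) ++ "\n"

-- ===== PRECONDITION & SPEC =====
-- A raises IndexError iff width is negative with width%3 != 0 and length >= 3 (it then indexes
-- into the empty rows); Pre_ excludes exactly those inputs.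
def Pre_room_planner (width : Int) (length : Int) : Prop :=
  ¬ (width < 0 ∧ PySem.Int.mod width 3 ≠ 0 ∧ 3 ≤ length)
instance (width : Int) (length : Int) : Decidable (Pre_room_planner width length) := by
  unfold Pre_room_planner; infer_instance
def pvWitness_room_planner : Int × Int := (7, 8)

def Spec_room_planner (width : Int) (length : Int) (out : String) : Prop :=
  out = room_planner_alt width length
instance (width : Int) (length : Int) (out : String) : Decidable (Spec_room_planner width length out) := by
  unfold Spec_room_planner; infer_instance

-- ===== CLAIM (what is proved, stated in full; the proofs are below) =====
def Claim_equal_room_planner : Prop := ∀ (width : Int) (length : Int), Dom_room_planner width length → Pre_room_planner width length → Spec_room_planner width length (room_planner width length)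

-- ===== LEMMAS AND PROOFS =====

-- the cell value after g leftover groups have been written (proof-side description of A's grid)
def pvCellG (width length : Int) (g : Nat) (r c : Int) : String :=
  let wm := PySem.Int.mod width 3
  let w3 := width - wm
  let n := PySem.Int.floordiv w3 3
  let base := length * n
  if c < w3 then PySem.Int.toStr (r * n + PySem.Int.floordiv c 3 + 1)
  else if r < 3 * (g : Int) then
    (if wm = 1 then PySem.Int.toStr (base + PySem.Int.floordiv r 3 + 1)
     else PySem.Int.toStr (base + 2 * PySem.Int.floordiv r 3 + (if c = w3 then 1 else 2)))
  else "0"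

lemma pv_pySetD_neg {α : Type} (xs : List α) (i : Int) (v : α)
    (h1 : -(xs.length : Int) ≤ i) (h2 : i < 0) :
    PySem.List.pySetD xs i v = xs.set ((xs.length : Int) + i).toNat v := by
  have hk : xs.length - (-i).toNat = ((xs.length : Int) + i).toNat := by omega
  simp [PySem.List.pySetD, PySem.List.pySet?, PySem.List.pyIdx?,
        if_neg (by omega : ¬ 0 ≤ i), if_pos h1, hk]

lemma pv_set_map_pyRange {α : Type} (f : Int → α) (b : Int) (k : Nat) (v : α)
    (_hk : (k : Int) < b) :
    (((PySem.List.pyRange 0 b 1).map f).set k v)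
      = (PySem.List.pyRange 0 b 1).map (fun x => if x = (k : Int) then v else f x) := by
  apply List.ext_getElem
  · simp
  · intro i h1 h2
    rw [List.getElem_set]
    simp only [List.getElem_map, PySem.List.getElem_pyRange_one]
    by_cases hik : i = k
    · simp [hik]
    · rw [if_neg (by omega), if_neg (by omega : ¬ (0 + (i : Int) = (k : Int)))]

lemma pv_pySetD_map_pyRange {α : Type} (f : Int → α) (b i : Int) (v : α)
    (h1 : 0 ≤ i) (h2 : i < b) :
    PySem.List.pySetD ((PySem.List.pyRange 0 b 1).map f) i v
      = (PySem.List.pyRange 0 b 1).map (fun x => if x = i then v else f x) := by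
  rw [PySem.List.pySetD_of_nonneg _ _ h1]
  have hi : i = ((i.toNat : Nat) : Int) := by omega
  rw [hi]
  simp only [Int.toNat_natCast]
  rw [pv_set_map_pyRange f b i.toNat v (by omega)]

lemma pv_pySetD_map_pyRange_neg {α : Type} (f : Int → α) (b i : Int) (v : α)
    (h1 : -b ≤ i) (h2 : i < 0) :
    PySem.List.pySetD ((PySem.List.pyRange 0 b 1).map f) i v
      = (PySem.List.pyRange 0 b 1).map (fun x => if x = b + i then v else f x) := by
  have hlen : ((((PySem.List.pyRange 0 b 1).map f).length : Int)) = b := by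
    simp [PySem.List.length_pyRange_one]; omega
  rw [pv_pySetD_neg _ _ _ (by rw [hlen]; exact h1) h2, hlen]
  rw [pv_set_map_pyRange f b (b + i).toNat v (by omega)]
  exact List.map_congr_left (fun x _ => by rw [show (((b + i).toNat : Nat) : Int) = b + i by omega])

lemma pv_setCell_grid (F : Int → Int → String) (L width i j : Int) (v : String)
    (hi : 0 ≤ i) (hiL : i < L) (hj1 : -width ≤ j) (hj2 : j < 0) :
    pvSetCell ((PySem.List.pyRange 0 L 1).map (fun r => (PySem.List.pyRange 0 width 1).map (F r))) i j v
      = (PySem.List.pyRange 0 L 1).map (fun r => (PySem.List.pyRange 0 width 1).map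
          (fun c => if r = i ∧ c = width + j then v else F r c)) := by
  unfold pvSetCell
  rw [PySem.List.pyGetD_map_pyRange_of_nonneg _ _ _ _ hi hiL]
  rw [pv_pySetD_map_pyRange_neg (F i) width j v hj1 hj2]
  rw [pv_pySetD_map_pyRange _ L i _ hi hiL]
  apply List.map_congr_left
  intro r hr
  rw [PySem.List.mem_pyRange_one] at hr
  by_cases hri : r = i
  · rw [if_pos hri]
    apply List.map_congr_left
    intro c _
    by_cases hc : c = width + j
    · simp [hc, hri]
    · simp [hc, hri]
  · rw [if_neg hri]
    apply List.map_congr_left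
    intro c _
    rw [if_neg (by tauto)]

lemma pv_inner_eq (width : Int) (hw : 0 ≤ width) (ri0 : Int) (m : Nat) (hm : (m : Int) ≤ width) :
    (PySem.List.pyRange 0 (m : Int) 1).foldl (pvInnerStep width (PySem.Int.mod width 3 * (-1))) ([], ri0)
      = ((PySem.List.pyRange 0 (m : Int) 1).map
           (fun x => if x < width - PySem.Int.mod width 3
                     then PySem.Int.toStr (ri0 + PySem.Int.floordiv x 3 + 1) else "0"),
         ri0 + ((min m (width - PySem.Int.mod width 3).toNat + 2) / 3 : Nat)) := by
  have hmod : PySem.Int.mod width 3 = width % 3 :=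
    PySem.Int.mod_eq_emod_of_pos (by norm_num : (0:Int) < 3)
  have hW3 : ((width - width % 3).toNat : Int) = width - width % 3 := by omega
  set w3n : Nat := (width - width % 3).toNat with hw3n
  have hw3mod : w3n % 3 = 0 := by omega
  induction m with
  | zero =>
      rw [PySem.List.pyRange_one_eq_nil (by norm_num)]
      simp
  | succ m ih =>
      have hm' : (m : Int) ≤ width := by push_cast at hm ⊢; omega
      have hcast : ((m + 1 : Nat) : Int) = (m : Int) + 1 := by push_cast; ring
      rw [hcast, PySem.List.pyRange_one_succ_right (by positivity), List.foldl_append,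
          List.map_append, ih hm']
      simp only [List.foldl_cons, List.foldl_nil]
      unfold pvInnerStep
      have hmod3 : PySem.Int.mod (m : Int) 3 = ((m % 3 : Nat) : Int) := by
        rw [PySem.Int.mod_eq_emod_of_pos (by norm_num : (0:Int) < 3)]; push_cast; omega
      have hfd : PySem.Int.floordiv (m : Int) 3 = ((m / 3 : Nat) : Int) := by
        rw [PySem.Int.floordiv_eq_ediv_of_pos (by norm_num : (0:Int) < 3)]; push_cast; omega
      rw [hmod]
      simp only [hmod3, hfd, List.map_cons, List.map_nil]
      by_cases hc : (m : Int) < width - width % 3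
      · have hmw : m < w3n := by omega
        rw [if_pos (by omega : (m : Int) < width + width % 3 * (-1)), if_pos hc]
        by_cases h3 : m % 3 = 0
        · have e1 : (min m w3n + 2) / 3 = m / 3 := by omega
          have e2 : (min (m + 1) w3n + 2) / 3 = m / 3 + 1 := by omega
          rw [if_pos (by exact_mod_cast h3), e1, e2, Prod.mk.injEq]
          exact ⟨rfl, by push_cast; ring⟩
        · have e1 : (min m w3n + 2) / 3 = m / 3 + 1 := by omega
          have e2 : (min (m + 1) w3n + 2) / 3 = m / 3 + 1 := by omega
          rw [if_neg (by omega : ¬ ((m % 3 : Nat) : Int) = 0), e1, e2, Prod.mk.injEq]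
          have e3 : ri0 + ((m / 3 + 1 : Nat) : Int) = ri0 + ((m / 3 : Nat) : Int) + 1 := by
            push_cast; ring
          rw [e3]
          exact ⟨rfl, rfl⟩
      · have e2 : (min (m + 1) w3n + 2) / 3 = (min m w3n + 2) / 3 := by omega
        rw [if_neg (by omega : ¬ (m : Int) < width + width % 3 * (-1)), if_neg hc, e2]

lemma pv_inner_full (width : Int) (hw : 0 ≤ width) (ri0 : Int) :
    (PySem.List.pyRange 0 width 1).foldl (pvInnerStep width (PySem.Int.mod width 3 * (-1))) ([], ri0)
      = ((PySem.List.pyRange 0 width 1).map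
           (fun x => if x < width - PySem.Int.mod width 3
                     then PySem.Int.toStr (ri0 + PySem.Int.floordiv x 3 + 1) else "0"),
         ri0 + PySem.Int.floordiv (width - PySem.Int.mod width 3) 3) := by
  have hmod : PySem.Int.mod width 3 = width % 3 :=
    PySem.Int.mod_eq_emod_of_pos (by norm_num : (0:Int) < 3)
  have hWc : ((width.toNat : Nat) : Int) = width := by omega
  have h := pv_inner_eq width hw ri0 width.toNat (by omega)
  rw [hWc] at h
  rw [h, Prod.mk.injEq]
  refine ⟨rfl, ?_⟩
  have hfd : PySem.Int.floordiv (width - PySem.Int.mod width 3) 3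
      = (((width - width % 3).toNat / 3 : Nat) : Int) := by
    rw [hmod, PySem.Int.floordiv_eq_ediv_of_pos (by norm_num : (0:Int) < 3)]
    omega
  rw [hfd, hmod]
  have hmin : min width.toNat (width - width % 3).toNat = (width - width % 3).toNat := by omega
  rw [hmin]
  have h30 : (width - width % 3).toNat % 3 = 0 := by omega
  congr 1
  omega

lemma pv_outer_eq (width : Int) (hw : 0 ≤ width) (L : Nat) :
    (PySem.List.pyRange 0 (L : Int) 1).foldl (pvRowStep width (PySem.Int.mod width 3 * (-1))) ([], 0)
      = ((PySem.List.pyRange 0 (L : Int) 1).map (fun r => (PySem.List.pyRange 0 width 1).map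
           (fun x => if x < width - PySem.Int.mod width 3
                     then PySem.Int.toStr (r * PySem.Int.floordiv (width - PySem.Int.mod width 3) 3
                            + PySem.Int.floordiv x 3 + 1) else "0")),
         (L : Int) * PySem.Int.floordiv (width - PySem.Int.mod width 3) 3) := by
  induction L with
  | zero =>
      rw [PySem.List.pyRange_one_eq_nil (by norm_num)]
      simp
  | succ L ih =>
      have hcast : ((L + 1 : Nat) : Int) = (L : Int) + 1 := by push_cast; ring
      rw [hcast, PySem.List.pyRange_one_succ_right (by positivity), List.foldl_append,
          List.map_append, ih]
      simp only [List.foldl_cons, List.foldl_nil]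
      unfold pvRowStep
      rw [pv_inner_full width hw _]
      simp only [List.map_cons, List.map_nil, Prod.mk.injEq]
      exact ⟨by trivial, by ring⟩

lemma pv_outer_neg (width : Int) (hw : width < 0) (L : Nat) :
    (PySem.List.pyRange 0 (L : Int) 1).foldl (pvRowStep width (PySem.Int.mod width 3 * (-1))) ([], 0)
      = ((PySem.List.pyRange 0 (L : Int) 1).map (fun _ => ([] : List String)), 0) := by
  induction L with
  | zero =>
      rw [PySem.List.pyRange_one_eq_nil (by norm_num)]
      simp
  | succ L ih =>
      have hcast : ((L + 1 : Nat) : Int) = (L : Int) + 1 := by push_cast; ring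
      rw [hcast, PySem.List.pyRange_one_succ_right (by positivity), List.foldl_append,
          List.map_append, ih]
      simp only [List.foldl_cons, List.foldl_nil]
      unfold pvRowStep
      rw [PySem.List.pyRange_one_eq_nil (by omega : width ≤ 0)]
      simp

lemma pv_pyRange3 (b : Int) (K : Nat) (hb : b = 3 * (K : Int)) :
    PySem.List.pyRange 0 b 3 = (List.range K).map (fun g : Nat => (3 * (g : Int))) := by
  rw [PySem.List.pyRange_of_pos _ _ (by norm_num : (0:Int) < 3)]
  by_cases hK : K = 0
  · subst hK
    rw [if_neg (by omega)]
    simp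
  · rw [if_pos (by omega)]
    have hdiv : ((b - 0 + 3 - 1) / 3).toNat = K := by omega
    rw [hdiv]
    exact List.map_congr_left (fun x _ => by ring)

lemma pv_pyRange3_nil (b : Int) (hb : b ≤ 0) : PySem.List.pyRange 0 b 3 = [] := by
  rw [PySem.List.pyRange_of_pos _ _ (by norm_num : (0:Int) < 3)]
  rw [if_neg (by omega)]
  simp

set_option maxHeartbeats 2000000 in
lemma pv_fix_step (width length : Int) (hw : 0 ≤ width) (hwm : PySem.Int.mod width 3 ≠ 0)
    (g : Nat) (hg : 3 * (g : Int) + 3 ≤ length) :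
    pvFixStep (PySem.Int.mod width 3 * (-1))
      ((PySem.List.pyRange 0 length 1).map (fun r => (PySem.List.pyRange 0 width 1).map (pvCellG width length g r)),
       length * PySem.Int.floordiv (width - PySem.Int.mod width 3) 3 + (g : Int) * PySem.Int.mod width 3)
      (3 * (g : Int))
      = ((PySem.List.pyRange 0 length 1).map (fun r => (PySem.List.pyRange 0 width 1).map (pvCellG width length (g + 1) r)),
         length * PySem.Int.floordiv (width - PySem.Int.mod width 3) 3 + ((g : Int) + 1) * PySem.Int.mod width 3) := by
  have hmod : PySem.Int.mod width 3 = width % 3 :=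
    PySem.Int.mod_eq_emod_of_pos (by norm_num : (0:Int) < 3)
  have hwm2 : width % 3 = 1 ∨ width % 3 = 2 := by omega
  have hw1 : 1 ≤ width := by omega
  have hfd3 : ∀ r : Int, 3 * (g : Int) ≤ r → r < 3 * (g : Int) + 3 →
      PySem.Int.floordiv r 3 = (g : Int) := by
    intro r h1 h2
    rw [PySem.Int.floordiv_eq_ediv_of_pos (by norm_num : (0:Int) < 3)]
    omega
  unfold pvFixStep
  simp only []
  rw [hmod]
  rcases hwm2 with hwm1 | hwm1
  · rw [hwm1]
    rw [if_neg (by norm_num)]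
    rw [pv_setCell_grid _ length width (3 * (g : Int)) (1 * (-1)) _ (by positivity) (by omega)
          (by omega) (by norm_num)]
    rw [pv_setCell_grid _ length width (3 * (g : Int) + 1) (1 * (-1)) _ (by positivity) (by omega)
          (by omega) (by norm_num)]
    rw [pv_setCell_grid _ length width (3 * (g : Int) + 2) (1 * (-1)) _ (by positivity) (by omega)
          (by omega) (by norm_num)]
    rw [Prod.mk.injEq]
    refine ⟨?_, by ring⟩
    apply List.map_congr_left
    intro r hr
    rw [PySem.List.mem_pyRange_one] at hr
    apply List.map_congr_left
    intro c hc
    rw [PySem.List.mem_pyRange_one] at hc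
    simp only [pvCellG, hmod, hwm1]
    push_cast
    by_cases hrg : 3 * (g : Int) ≤ r ∧ r < 3 * (g : Int) + 3
    · have hfd := hfd3 r hrg.1 hrg.2
      split_ifs <;> first | rfl | omega | (congr 1; omega)
    · split_ifs <;> first | rfl | omega
  · rw [hwm1]
    rw [if_pos (by norm_num)]
    rw [pv_setCell_grid _ length width (3 * (g : Int)) (2 * (-1)) _ (by positivity) (by omega)
          (by omega) (by norm_num)]
    rw [pv_setCell_grid _ length width (3 * (g : Int) + 1) (2 * (-1)) _ (by positivity) (by omega)
          (by omega) (by norm_num)]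
    rw [pv_setCell_grid _ length width (3 * (g : Int) + 2) (2 * (-1)) _ (by positivity) (by omega)
          (by omega) (by norm_num)]
    rw [pv_setCell_grid _ length width (3 * (g : Int)) (2 * (-1) + 1) _ (by positivity) (by omega)
          (by omega) (by norm_num)]
    rw [pv_setCell_grid _ length width (3 * (g : Int) + 1) (2 * (-1) + 1) _ (by positivity) (by omega)
          (by omega) (by norm_num)]
    rw [pv_setCell_grid _ length width (3 * (g : Int) + 2) (2 * (-1) + 1) _ (by positivity) (by omega)
          (by omega) (by norm_num)]
    rw [Prod.mk.injEq]
    refine ⟨?_, by ring⟩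
    apply List.map_congr_left
    intro r hr
    rw [PySem.List.mem_pyRange_one] at hr
    apply List.map_congr_left
    intro c hc
    rw [PySem.List.mem_pyRange_one] at hc
    simp only [pvCellG, hmod, hwm1]
    push_cast
    by_cases hrg : 3 * (g : Int) ≤ r ∧ r < 3 * (g : Int) + 3
    · have hfd := hfd3 r hrg.1 hrg.2
      split_ifs <;> first | rfl | omega | (congr 1; omega)
    · split_ifs <;> first | rfl | omega

lemma pv_fix_fold (width length : Int) (hw : 0 ≤ width) (hwm : PySem.Int.mod width 3 ≠ 0)
    (K : Nat) (hK : 3 * (K : Int) ≤ length) :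
    ((List.range K).map (fun g : Nat => (3 * (g : Int)))).foldl (pvFixStep (PySem.Int.mod width 3 * (-1)))
      ((PySem.List.pyRange 0 length 1).map (fun r => (PySem.List.pyRange 0 width 1).map (pvCellG width length 0 r)),
       length * PySem.Int.floordiv (width - PySem.Int.mod width 3) 3)
      = ((PySem.List.pyRange 0 length 1).map (fun r => (PySem.List.pyRange 0 width 1).map (pvCellG width length K r)),
         length * PySem.Int.floordiv (width - PySem.Int.mod width 3) 3 + (K : Int) * PySem.Int.mod width 3) := by
  induction K with
  | zero => simp
  | succ K ih =>
      have hK' : 3 * (K : Int) ≤ length := by push_cast at hK ⊢; omega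
      rw [List.range_succ, List.map_append, List.foldl_append, ih hK']
      simp only [List.map_cons, List.map_nil, List.foldl_cons, List.foldl_nil]
      rw [pv_fix_step width length hw hwm K (by push_cast at hK ⊢; omega)]
      rw [Prod.mk.injEq]
      exact ⟨rfl, by push_cast; ring⟩

-- ===== VERDICT (by name: the statement is the Claim_ definition above) =====
theorem room_planner_spec : Claim_equal_room_planner := by
  intro width length _hd hpre
  unfold Pre_room_planner at hpre
  unfold Spec_room_planner
  simp only [room_planner, room_planner_alt]
  have hmodw : PySem.Int.mod width 3 = width % 3 :=
    PySem.Int.mod_eq_emod_of_pos (by norm_num : (0:Int) < 3)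
  have hmodl : PySem.Int.mod length 3 = length % 3 :=
    PySem.Int.mod_eq_emod_of_pos (by norm_num : (0:Int) < 3)
  by_cases hl : 0 ≤ length
  · set L : Nat := length.toNat with hLdef
    have hL : ((L : Nat) : Int) = length := by omega
    rw [← hL]
    by_cases hwneg : width < 0
    · -- width < 0: every row is empty; Pre_ rules out the overwrite loop running
      rw [pv_outer_neg width hwneg L]
      split_ifs with hwm
      · have hfix : PySem.List.pyRange 0 ((L : Int) - PySem.Int.mod (L : Int) 3) 3 = [] := by
          apply pv_pyRange3_nil
          have hm : PySem.Int.mod ((L : Nat) : Int) 3 = ((L : Nat) : Int) % 3 :=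
            PySem.Int.mod_eq_emod_of_pos (by norm_num : (0:Int) < 3)
          have hl3 : length < 3 := by
            by_contra hcon
            exact hpre ⟨hwneg, hwm, by omega⟩
          omega
        rw [hfix]
        simp only [List.foldl_nil]
        rw [List.map_map]
        congr 2
        apply List.map_congr_left
        intro r _
        rw [PySem.List.pyRange_one_eq_nil (by omega : width ≤ 0)]
        simp
      · rw [List.map_map]
        congr 2
        apply List.map_congr_left
        intro r _
        rw [PySem.List.pyRange_one_eq_nil (by omega : width ≤ 0)]
        simp
    · -- main case: width ≥ 0
      have hw : 0 ≤ width := by omega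
      rw [pv_outer_eq width hw L]
      by_cases hwm : PySem.Int.mod width 3 ≠ 0
      · rw [if_pos hwm]
        have hmr : (L : Int) - PySem.Int.mod (L : Int) 3 = 3 * (((L / 3 : Nat) : Nat) : Int) := by
          have : PySem.Int.mod ((L : Nat) : Int) 3 = ((L : Nat) : Int) % 3 :=
            PySem.Int.mod_eq_emod_of_pos (by norm_num : (0:Int) < 3)
          rw [this]; push_cast; omega
        rw [pv_pyRange3 _ (L / 3) hmr]
        have hgrid0 : ((PySem.List.pyRange 0 (L : Int) 1).map (fun r => (PySem.List.pyRange 0 width 1).map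
              (fun x => if x < width - PySem.Int.mod width 3
                        then PySem.Int.toStr (r * PySem.Int.floordiv (width - PySem.Int.mod width 3) 3
                               + PySem.Int.floordiv x 3 + 1) else "0")))
            = ((PySem.List.pyRange 0 (L : Int) 1).map (fun r => (PySem.List.pyRange 0 width 1).map
              (pvCellG width (L : Int) 0 r))) := by
          apply List.map_congr_left
          intro r hr
          rw [PySem.List.mem_pyRange_one] at hr
          apply List.map_congr_left
          intro c hc
          rw [PySem.List.mem_pyRange_one] at hc
          simp only [pvCellG]
          split_ifs <;> first | rfl | omega
        rw [hgrid0, pv_fix_fold width (L : Int) hw hwm (L / 3) (by push_cast; omega)]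
        rw [List.map_map]
        congr 2
        apply List.map_congr_left
        intro r hr
        rw [PySem.List.mem_pyRange_one] at hr
        simp only [Function.comp]
        congr 1
        apply List.map_congr_left
        intro c hc
        rw [PySem.List.mem_pyRange_one] at hc
        simp only [pvCellG, pvCellB, hmodw]
        have hmodL : PySem.Int.mod ((L : Nat) : Int) 3 = ((L : Nat) : Int) % 3 :=
          PySem.Int.mod_eq_emod_of_pos (by norm_num : (0:Int) < 3)
        rw [hmodL]
        rw [hmodw] at hwm
        push_cast
        split_ifs <;> first | rfl | omega
      · rw [if_neg hwm]
        rw [List.map_map]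
        congr 2
        apply List.map_congr_left
        intro r hr
        rw [PySem.List.mem_pyRange_one] at hr
        simp only [Function.comp]
        congr 1
        apply List.map_congr_left
        intro c hc
        rw [PySem.List.mem_pyRange_one] at hc
        simp only [pvCellB, hmodw]
        rw [not_not] at hwm
        rw [hmodw] at hwm
        split_ifs <;> first | rfl | omega
  · -- length < 0: no rows at all
    rw [PySem.List.pyRange_one_eq_nil (by omega : length ≤ 0)]
    have hfix : PySem.List.pyRange 0 (length - PySem.Int.mod length 3) 3 = [] := by
      apply pv_pyRange3_nil
      rw [hmodl]
      omega
    rw [hfix]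
    simp only [List.foldl_nil]
    split_ifs <;> simp
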